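-- pv_equiv track=rewrite | github.com/EnnyTee2/alx-interview | 0x02-minimum_operations/lcm.py | lcm_gen
-- ===== SOURCE A (Python) =====
-- factors = (2, 3, 5, 7)
--
-- def lcm_gen(num):
--     '''Generates the LCMs for a given number'''
--     for factor in factors:
--         if (num % factor) == 0:
--             yield factor
--             yield from lcm_gen(num // factor)  # recursive part of generator
--             break
--         else:
--             if (factor == 7) and (num != 1):
--                 yield num
-- ===== SOURCE B (Python) =====
-- factors = (2, 3, 5, 7)
--
-- def lcm_gen(num):
--     '''Generates the LCMs for a given number'''
--     while True:
--         for factor in factors: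
--             if num % factor == 0:
--                 yield factor
--                 num //= factor
--                 break
--         else:
--             if num != 1:
--                 yield num
--             return
-- ===== Notes on version B (the rewrite author's own statement) =====
-- stated objective: idiomatic
-- what changed: Replaced the self-recursive generator (yield from lcm_gen(num//factor)) by an explicit iterative while-True loop that divides num in place and uses for...else to emit the final remainder, with no recursion and no last-factor sentinel test.
import Mathlib
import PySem

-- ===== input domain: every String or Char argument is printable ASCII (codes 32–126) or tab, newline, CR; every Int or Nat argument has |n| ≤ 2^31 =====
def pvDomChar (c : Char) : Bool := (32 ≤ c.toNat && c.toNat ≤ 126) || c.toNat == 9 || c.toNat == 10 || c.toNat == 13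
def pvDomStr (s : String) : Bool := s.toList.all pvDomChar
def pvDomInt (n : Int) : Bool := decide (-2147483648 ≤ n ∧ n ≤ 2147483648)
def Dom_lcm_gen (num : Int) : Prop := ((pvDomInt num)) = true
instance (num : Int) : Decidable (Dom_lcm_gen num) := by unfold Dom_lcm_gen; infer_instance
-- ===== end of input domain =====

-- B rewrites the self-recursive generator as an iterative while-loop with a for...else remainder emission; objective: idiomatic.


-- ===== PORT A =====
-- Literal port of A's recursive generator; fuel (num.natAbs + 1) only makes the
-- same recursion total in Lean — on num ≠ 0 it never runs out (proved below).
def lcm_genFuel : Nat → Int → List Int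
  | 0, _ => []
  | fuel + 1, num =>
    if PySem.Int.mod num 2 = 0 then 2 :: lcm_genFuel fuel (PySem.Int.floordiv num 2)
    else if PySem.Int.mod num 3 = 0 then 3 :: lcm_genFuel fuel (PySem.Int.floordiv num 3)
    else if PySem.Int.mod num 5 = 0 then 5 :: lcm_genFuel fuel (PySem.Int.floordiv num 5)
    else if PySem.Int.mod num 7 = 0 then 7 :: lcm_genFuel fuel (PySem.Int.floordiv num 7)
    else if num ≠ 1 then [num] else []

def lcm_gen (num : Int) : List Int := lcm_genFuel (num.natAbs + 1) num

-- ===== PORT B =====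
-- Port of B's iterative while-True loop: loop state is (num, yielded-so-far acc);
-- the inner for-loop is 'find first dividing factor'; for...else is the none case.
def lcm_gen_altFactors : List Int := [2, 3, 5, 7]

def lcm_gen_altLoop : Nat → Int → List Int → List Int
  | 0, _, acc => acc.reverse
  | fuel + 1, num, acc =>
    match lcm_gen_altFactors.find? (fun f => PySem.Int.mod num f == 0) with
    | some f => lcm_gen_altLoop fuel (PySem.Int.floordiv num f) (f :: acc)
    | none => acc.reverse ++ (if num ≠ 1 then [num] else [])

def lcm_gen_alt (num : Int) : List Int := lcm_gen_altLoop (num.natAbs + 1) num []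

-- ===== PRECONDITION & SPEC =====
-- Pre_ excludes the zero input, on which Python A (and B) loops forever yielding the first factor.
def Pre_lcm_gen (num : Int) : Prop := num ≠ 0
instance (num : Int) : Decidable (Pre_lcm_gen num) := by unfold Pre_lcm_gen; infer_instance
def pvWitness_lcm_gen : Int := (12)

def Spec_lcm_gen (num : Int) (out : List Int) : Prop := out = lcm_gen_alt num
instance (num : Int) (out : List Int) : Decidable (Spec_lcm_gen num out) := by unfold Spec_lcm_gen; infer_instance

-- ===== CLAIM (what is proved, stated in full; the proofs are below) =====
def Claim_equal_lcm_gen : Prop := ∀ (num : Int), Dom_lcm_gen num → Pre_lcm_gen num → Spec_lcm_gen num (lcm_gen num)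

-- ===== LEMMAS AND PROOFS =====

-- Exact division by a positive factor: quotient nonzero and strictly smaller in magnitude.
theorem lcm_gen_div_step (num f : Int) (hf : 2 ≤ f) (hnum : num ≠ 0)
    (h : PySem.Int.mod num f = 0) :
    PySem.Int.floordiv num f ≠ 0 ∧ (PySem.Int.floordiv num f).natAbs < num.natAbs := by
  have hfpos : (0:Int) < f := by omega
  have hdvd : f ∣ num := (PySem.Int.mod_eq_zero_iff_dvd num f).1 h
  have heq : PySem.Int.floordiv num f = num / f := PySem.Int.floordiv_eq_ediv_of_pos hfpos
  obtain ⟨k, hk⟩ := hdvd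
  have hq : num / f = k := by rw [hk, Int.mul_ediv_cancel_left _ (by omega)]
  have hk0 : k ≠ 0 := by rintro rfl; simp at hk; omega
  constructor
  · rw [heq, hq]; exact hk0
  · rw [heq, hq, hk]
    have : k.natAbs < (f * k).natAbs := by
      rw [Int.natAbs_mul]
      have h1 : 1 ≤ k.natAbs := Int.natAbs_pos.mpr hk0
      have h2 : 2 ≤ f.natAbs := by omega
      nlinarith
    exact this

theorem lcm_gen_key : ∀ (fa fb : Nat) (num : Int) (acc : List Int), num ≠ 0 →
    num.natAbs ≤ fa → num.natAbs ≤ fb →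
    lcm_gen_altLoop fb num acc = acc.reverse ++ lcm_genFuel fa num := by
  intro fa
  induction fa with
  | zero => intro fb num acc h0 ha _; exact absurd (by omega : num.natAbs = 0) (by simpa using h0)
  | succ fa ih =>
    intro fb num acc h0 ha hb
    have h1 : 1 ≤ num.natAbs := by
      rcases Int.natAbs_eq_zero.mp.mt (by simpa using h0) with h; omega
    obtain ⟨fb', rfl⟩ : ∃ fb', fb = fb' + 1 := ⟨fb - 1, by omega⟩
    rw [lcm_gen_altLoop, lcm_genFuel]
    simp only [lcm_gen_altFactors, List.find?]
    by_cases h2 : PySem.Int.mod num 2 = 0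
    · obtain ⟨hne, hlt⟩ := lcm_gen_div_step num 2 (by norm_num) h0 h2
      simp only [h2, beq_self_eq_true]
      rw [ih fb' _ (2 :: acc) hne (by omega) (by omega)]
      simp
    · simp only [if_neg h2, (by simpa using h2 : ((PySem.Int.mod num 2 == 0) = false))]
      by_cases h3 : PySem.Int.mod num 3 = 0
      · obtain ⟨hne, hlt⟩ := lcm_gen_div_step num 3 (by norm_num) h0 h3
        simp only [h3, beq_self_eq_true]
        rw [ih fb' _ (3 :: acc) hne (by omega) (by omega)]
        simp
      · simp only [if_neg h3, (by simpa using h3 : ((PySem.Int.mod num 3 == 0) = false))]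
        by_cases h5 : PySem.Int.mod num 5 = 0
        · obtain ⟨hne, hlt⟩ := lcm_gen_div_step num 5 (by norm_num) h0 h5
          simp only [h5, beq_self_eq_true]
          rw [ih fb' _ (5 :: acc) hne (by omega) (by omega)]
          simp
        · simp only [if_neg h5, (by simpa using h5 : ((PySem.Int.mod num 5 == 0) = false))]
          by_cases h7 : PySem.Int.mod num 7 = 0
          · obtain ⟨hne, hlt⟩ := lcm_gen_div_step num 7 (by norm_num) h0 h7
            simp only [h7, beq_self_eq_true]
            rw [ih fb' _ (7 :: acc) hne (by omega) (by omega)]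
            simp
          · simp only [if_neg h7, (by simpa using h7 : ((PySem.Int.mod num 7 == 0) = false))]

-- ===== VERDICT (by name: the statement is the Claim_ definition above) =====
theorem lcm_gen_spec : Claim_equal_lcm_gen := by
  intro num _ hpre
  unfold Spec_lcm_gen lcm_gen lcm_gen_alt
  rw [lcm_gen_key (num.natAbs + 1) (num.natAbs + 1) num [] hpre (by omega) (by omega)]
  simp
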